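-- pv_equiv track=rewrite | github.com/awesomeo184/algorithm-study | problems/2021_07/boj_11497_통나무건너뛰기.py | solution
-- ===== SOURCE A (Python) =====
-- import heapq
-- from typing import List
--
-- def solution(arr: List) -> int:
--     max_heap = []
--     for num in arr:
--         heapq.heappush(max_heap, -num)
--
--     i = 0
--     left, center, right = [], [], []
--
--     elem = heapq.heappop(max_heap) * -1
--     center.append(elem)
--
--     while len(max_heap) > 0:
--         elem = heapq.heappop(max_heap) * -1
--
--         if i % 2 == 0:
--             left.append(elem)
--         else:
--             right.append(elem)
--
--         i += 1
--
--     left.reverse()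
--     result = left + center + right
--
--     max_diff = 0
--     for i in range(1, len(result)):
--         diff = abs(result[i-1] - result[i])
--         max_diff = max(max_diff, diff)
--
--     return max_diff
-- ===== SOURCE B (Python) =====
-- def solution(arr):
--     d = sorted(arr, reverse=True)
--     top = d[0]  # raises IndexError on empty input, as the original does
--     if len(d) == 1:
--         return 0
--     best = top - d[1]
--     for i in range(len(d) - 2):
--         best = max(best, d[i] - d[i + 2])
--     return best
-- ===== Notes on version B (the rewrite author's own statement) =====
-- stated objective: faster
-- what changed: Instead of simulating a heap element by element and physically building the left/center/right zigzag arrangement and then scanning its adjacent pairs, B sorts once descending and computes the answer directly as the maximum of the gap between the two largest values and the gaps between values two positions apart, since those are exactly the adjacent pairs of the zigzag.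
import Mathlib
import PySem

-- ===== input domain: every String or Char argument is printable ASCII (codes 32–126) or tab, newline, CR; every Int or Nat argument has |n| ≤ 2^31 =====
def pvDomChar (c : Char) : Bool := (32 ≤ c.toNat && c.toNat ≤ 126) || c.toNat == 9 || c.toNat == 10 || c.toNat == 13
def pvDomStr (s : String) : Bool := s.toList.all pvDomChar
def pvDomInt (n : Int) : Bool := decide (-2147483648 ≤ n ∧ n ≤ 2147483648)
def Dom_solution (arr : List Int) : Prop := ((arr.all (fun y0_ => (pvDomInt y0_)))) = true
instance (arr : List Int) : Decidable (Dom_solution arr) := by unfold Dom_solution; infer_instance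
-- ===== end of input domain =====

-- B computes the maximum adjacent gap of A's zigzag arrangement directly from the
-- descending-sorted list instead of simulating the heap and building the arrangement
-- (objective: faster — one built-in sort replaces the per-element heap simulation).

-- ===== PORT A =====
-- heapq.heappush/heappop are not A's own code; since only the popped VALUES of a heap
-- of Ints are observable (heappop returns the minimum), the heap is modeled exactly
-- by an ascending-sorted list: heappush = sorted insert, heappop = take the head.
def heappush (h : List Int) (x : Int) : List Int :=
  match h with
  | [] => [x]
  | y :: ys => if x ≤ y then x :: y :: ys else y :: heappush ys x

-- the `while len(max_heap) > 0` pop loop with state (i, left, right)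
def popLoop : List Int → Int → List Int → List Int → List Int × List Int
  | [], _, left, right => (left, right)
  | y :: ys, i, left, right =>
    if PySem.Int.mod i 2 = 0 then
      popLoop ys (i + 1) (left ++ [y * -1]) right
    else
      popLoop ys (i + 1) left (right ++ [y * -1])

def solution (arr : List Int) : Int :=
  let maxHeap := arr.foldl (fun h num => heappush h (-num)) []
  match maxHeap with
  | [] => 0   -- unreachable under Pre_solution: Python raises IndexError on the empty heap
  | e0 :: rest =>
    let c := e0 * -1
    let (left, right) := popLoop rest 0 [] []
    let result := left.reverse ++ [c] ++ right
    (PySem.List.pyRange 1 (result.length : Int) 1).foldl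
      (fun md i => max md |PySem.List.pyGetD result (i - 1) 0 - PySem.List.pyGetD result i 0|) 0

-- ===== PORT B =====
def solution_alt (arr : List Int) : Int :=
  let d := PySem.List.sorted arr (fun x => x) true
  let top := PySem.List.pyGetD d 0 0   -- d[0]; Pre_solution excludes [], where Python raises IndexError
  if d.length = 1 then 0
  else
    (PySem.List.pyRange 0 ((d.length : Int) - 2) 1).foldl
      (fun best i => max best (PySem.List.pyGetD d i 0 - PySem.List.pyGetD d (i + 2) 0))
      (top - PySem.List.pyGetD d 1 0)

-- ===== PRECONDITION & SPEC =====
-- Both programs raise IndexError on the empty list (A pops an empty heap, B reads d[0]).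
def Pre_solution (arr : List Int) : Prop := arr ≠ []
instance (arr : List Int) : Decidable (Pre_solution arr) := by unfold Pre_solution; infer_instance
def pvWitness_solution : List Int := [3, 1, 2]

def Spec_solution (arr : List Int) (out : Int) : Prop := out = solution_alt arr
instance (arr : List Int) (out : Int) : Decidable (Spec_solution arr out) := by unfold Spec_solution; infer_instance

-- ===== CLAIM (what is proved, stated in full; the proofs are below) =====
def Claim_equal_solution : Prop := ∀ (arr : List Int), Dom_solution arr → Pre_solution arr → Spec_solution arr (solution arr)

-- ===== LEMMAS AND PROOFS =====

-- adjacent absolute differences of a list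
def adjA (l : List Int) : List Int := List.zipWith (fun a b => |a - b|) l l.tail
-- adjacent differences (no abs)
def g1 (l : List Int) : List Int := List.zipWith (fun a b => a - b) l l.tail
-- differences at distance two
def g2 (l : List Int) : List Int := List.zipWith (fun a b => a - b) l (l.tail.tail)
-- split into even- and odd-indexed elements
def esplit : List Int → List Int × List Int
  | [] => ([], [])
  | x :: xs => ((esplit xs).2.cons x, (esplit xs).1)

lemma heappush_eq (h : List Int) (x : Int) :
    heappush h x = List.orderedInsert (· ≤ ·) x h := by
  induction h with
  | nil => rfl
  | cons y ys ih => simp [heappush, List.orderedInsert, ih]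

lemma hfold_spec_gen (arr : List Int) : ∀ (h : List Int), h.Pairwise (· ≤ ·) →
    (arr.foldl (fun h num => heappush h (-num)) h).Pairwise (· ≤ ·) ∧
    (arr.foldl (fun h num => heappush h (-num)) h).Perm (h ++ arr.map (fun x => -x)) := by
  induction arr with
  | nil => intro h hp; simpa using hp
  | cons a as ih =>
    intro h hp
    have hp' : (heappush h (-a)).Pairwise (· ≤ ·) := by
      rw [heappush_eq]; exact List.Pairwise.orderedInsert _ _ hp
    obtain ⟨s1, s2⟩ := ih (heappush h (-a)) hp'
    refine ⟨s1, s2.trans ?_⟩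
    have hperm : (heappush h (-a)).Perm ((-a) :: h) := by
      rw [heappush_eq]; exact List.perm_orderedInsert _ _ _
    simp only [List.map_cons]
    exact (hperm.append_right _).trans (by simpa using List.perm_middle.symm)

lemma hfold_spec (arr : List Int) :
    (arr.foldl (fun h num => heappush h (-num)) []).Pairwise (· ≤ ·) ∧
    (arr.foldl (fun h num => heappush h (-num)) []).Perm (arr.map (fun x => -x)) := by
  simpa using hfold_spec_gen arr [] (by simp)

lemma popLoop_spec (t : List Int) (k : Nat) (l r : List Int) :
    popLoop t ((2 * k : Nat) : Int) l r =
      (l ++ (esplit (t.map (· * -1))).1, r ++ (esplit (t.map (· * -1))).2)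
    ∧ popLoop t ((2 * k + 1 : Nat) : Int) l r =
      (l ++ (esplit (t.map (· * -1))).2, r ++ (esplit (t.map (· * -1))).1) := by
  induction t generalizing k l r with
  | nil => simp [popLoop, esplit]
  | cons y ys ih =>
    constructor
    · have hmod : PySem.Int.mod ((2 * k : Nat) : Int) 2 = 0 := by
        rw [show ((2 : Int)) = ((2 : Nat) : Int) by norm_num, PySem.Int.mod_natCast]
        simp [Nat.mul_mod_right]
      rw [popLoop, if_pos hmod,
        show ((2 * k : Nat) : Int) + 1 = ((2 * k + 1 : Nat) : Int) by omega]
      rw [(ih k (l ++ [y * -1]) r).2]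
      simp [esplit]
    · have hmod : PySem.Int.mod ((2 * k + 1 : Nat) : Int) 2 = 1 := by
        rw [show ((2 : Int)) = ((2 : Nat) : Int) by norm_num, PySem.Int.mod_natCast]
        omega
      rw [popLoop, if_neg (by rw [hmod]; norm_num),
        show ((2 * k + 1 : Nat) : Int) + 1 = ((2 * (k + 1) : Nat) : Int) by omega]
      rw [(ih (k + 1) l (r ++ [y * -1])).1]
      simp [esplit]

lemma esplit_sublist (t : List Int) : (esplit t).1.Sublist t ∧ (esplit t).2.Sublist t := by
  induction t with
  | nil => simp [esplit]
  | cons x xs ih =>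
    refine ⟨?_, ?_⟩
    · simpa [esplit] using List.Sublist.cons₂ x ih.2
    · simpa [esplit] using List.Sublist.cons x ih.1

lemma gsplit_perm (t : List Int) :
    (g1 (esplit t).1 ++ g1 (esplit t).2).Perm (g2 t) := by
  induction t with
  | nil => simp [esplit, g1, g2]
  | cons x xs ih =>
    rcases xs with _ | ⟨y, _ | ⟨z, r⟩⟩
    · simp [esplit, g1, g2]
    · simp [esplit, g1, g2]
    · have h1 : esplit (x :: y :: z :: r) = (x :: z :: (esplit r).2, y :: (esplit r).1) := by
        simp [esplit]
      have h2 : g1 (x :: z :: (esplit r).2) = (x - z) :: g1 (z :: (esplit r).2) := by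
        simp [g1]
      have h3 : g2 (x :: y :: z :: r) = (x - z) :: g2 (y :: z :: r) := by
        simp [g2]
      rw [h1, h2, h3, List.cons_append]
      refine List.Perm.cons _ ?_
      have h4 : esplit (y :: z :: r) = (y :: (esplit r).1, z :: (esplit r).2) := by
        simp [esplit]
      rw [h4] at ih
      exact List.perm_append_comm.trans ih

lemma foldl_max_perm {l l' : List Int} (h : l.Perm l') : ∀ (a : Int),
    l.foldl max a = l'.foldl max a := by
  induction h with
  | nil => intro a; rfl
  | cons x _ ih => intro a; simp only [List.foldl_cons]; exact ih _
  | swap x y l => intro a; simp only [List.foldl_cons, max_right_comm]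
  | trans _ _ ih1 ih2 => intro a; rw [ih1, ih2]

lemma adjA_append (x : Int) (xs : List Int) (y : Int) (ys : List Int) :
    adjA ((x :: xs) ++ y :: ys) = adjA (x :: xs) ++ |(x :: xs).getLast (by simp) - y| :: adjA (y :: ys) := by
  induction xs generalizing x with
  | nil => simp [adjA]
  | cons a as ih =>
    simp only [List.cons_append] at ih ⊢
    have h1 : adjA (x :: a :: (as ++ y :: ys)) = |x - a| :: adjA (a :: (as ++ y :: ys)) := by
      simp [adjA]
    have h2 : adjA (x :: a :: as) = |x - a| :: adjA (a :: as) := by simp [adjA]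
    rw [h1, ih a, h2]
    simp [List.getLast_cons]

lemma adjA_reverse (l : List Int) : adjA l.reverse = (adjA l).reverse := by
  induction l with
  | nil => rfl
  | cons x xs ih =>
    rcases xs with _ | ⟨a, as⟩
    · rfl
    · rcases hr : (a :: as).reverse with _ | ⟨b, bs⟩
      · simp at hr
      · have h1 : adjA ((x :: a :: as).reverse) = adjA ((b :: bs) ++ x :: []) := by
          rw [List.reverse_cons, hr]
        have h2 : (b :: bs).getLast (by simp) = a := by
          have : (a :: as).reverse.getLast (by simp [hr]) = a := by
            simp
          simpa [hr] using this
        rw [h1, adjA_append, h2]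
        have h3 : adjA (x :: a :: as) = |x - a| :: adjA (a :: as) := by simp [adjA]
        rw [h3, List.reverse_cons, ← hr, ih]
        simp [adjA, abs_sub_comm]

lemma adjA_eq_g1 : ∀ {l : List Int}, l.Pairwise (· ≥ ·) → adjA l = g1 l
  | [], _ => rfl
  | [_], _ => rfl
  | x :: y :: r, h => by
    have hxy : x ≥ y := (List.pairwise_cons.1 h).1 y (by simp)
    have ht : (y :: r).Pairwise (· ≥ ·) := (List.pairwise_cons.1 h).2
    have h1 : adjA (x :: y :: r) = |x - y| :: adjA (y :: r) := by simp [adjA]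
    have h2 : g1 (x :: y :: r) = (x - y) :: g1 (y :: r) := by simp [g1]
    rw [h1, h2, adjA_eq_g1 ht, abs_of_nonneg (by omega)]

lemma adjA_eq_map_range (l : List Int) :
    adjA l = (List.range (l.length - 1)).map (fun k => |l.getD k 0 - l.getD (k + 1) 0|) := by
  apply List.ext_getElem
  · simp [adjA]
  · intro i h1 h2
    simp only [adjA, List.getElem_zipWith, List.getElem_map, List.getElem_range]
    have hi : i < l.length - 1 := by simp [adjA] at h1; omega
    rw [List.getElem_tail, List.getD_eq_getElem l 0 (by omega), List.getD_eq_getElem l 0 (by omega)]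

lemma g2_eq_map_range (d : List Int) :
    g2 d = (List.range (d.length - 2)).map (fun k => d.getD k 0 - d.getD (k + 2) 0) := by
  apply List.ext_getElem
  · simp [g2]; omega
  · intro i h1 h2
    simp only [g2, List.getElem_zipWith, List.getElem_map, List.getElem_range]
    have hi : i < d.length - 2 := by simp [g2] at h1; omega
    rw [List.getElem_tail, List.getElem_tail, List.getD_eq_getElem d 0 (by omega),
      List.getD_eq_getElem d 0 (by omega)]

lemma loopA_eq (l : List Int) :
    (PySem.List.pyRange 1 (l.length : Int) 1).foldl
      (fun md i => max md |PySem.List.pyGetD l (i - 1) 0 - PySem.List.pyGetD l i 0|) 0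
    = (adjA l).foldl max 0 := by
  rw [PySem.List.pyRange_one, List.foldl_map, adjA_eq_map_range, List.foldl_map,
    show ((l.length : Int) - 1).toNat = l.length - 1 by omega]
  congr 1
  funext md k
  rw [show (1 : Int) + (k : Int) - 1 = ((k : Nat) : Int) by omega,
    show (1 : Int) + (k : Int) = ((k + 1 : Nat) : Int) by omega]
  simp only [PySem.List.pyGetD_natCast]

lemma loopB_eq (d : List Int) (s : Int) :
    (PySem.List.pyRange 0 ((d.length : Int) - 2) 1).foldl
      (fun best i => max best (PySem.List.pyGetD d i 0 - PySem.List.pyGetD d (i + 2) 0)) s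
    = (g2 d).foldl max s := by
  rw [PySem.List.pyRange_one, List.foldl_map, g2_eq_map_range, List.foldl_map,
    show ((d.length : Int) - 2 - 0).toNat = d.length - 2 by omega]
  congr 1
  funext best k
  rw [show (0 : Int) + (k : Int) = ((k : Nat) : Int) by omega,
    show ((k : Nat) : Int) + 2 = ((k + 2 : Nat) : Int) by omega]
  simp only [PySem.List.pyGetD_natCast]

lemma sorted_eq_desc (arr : List Int) (D : List Int) (hp : D.Perm arr)
    (hpair : D.Pairwise (· ≥ ·)) :
    PySem.List.sorted arr (fun x => x) true = D := by
  have h1 : (PySem.List.sorted arr (fun x => x) true).Perm D :=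
    (PySem.List.sorted_perm arr (fun x => x) true).trans hp.symm
  have h2 : (PySem.List.sorted arr (fun x => x) true).Pairwise (· ≥ ·) :=
    PySem.List.sorted_pairwise_rev arr (fun x => x)
  exact h1.eq_of_pairwise (fun a b _ _ hab hba => le_antisymm hba hab) h2 hpair

-- the whole pipeline after the heap phase, as a function of the popped (negated) values
lemma zigzag_eq (c : Int) (t : List Int) (hpair : (c :: t).Pairwise (· ≥ ·)) :
    (adjA ((esplit t).1.reverse ++ [c] ++ (esplit t).2)).foldl max 0
    = if t = [] then 0 else (g2 (c :: t)).foldl max (c - t.getD 0 0) := by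
  rcases t with _ | ⟨t0, ts⟩
  · simp [esplit, adjA]
  · have htpair : (t0 :: ts).Pairwise (· ≥ ·) := (List.pairwise_cons.1 hpair).2
    have hct0 : t0 ≤ c := (List.pairwise_cons.1 hpair).1 t0 (by simp)
    have hE : (esplit (t0 :: ts)).1 = t0 :: (esplit ts).2 := by simp [esplit]
    have hE_pair : (esplit (t0 :: ts)).1.Pairwise (· ≥ ·) :=
      htpair.sublist (esplit_sublist (t0 :: ts)).1
    have hcO_pair : (c :: (esplit (t0 :: ts)).2).Pairwise (· ≥ ·) :=
      hpair.sublist (List.Sublist.cons₂ c (esplit_sublist (t0 :: ts)).2)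
    rcases hEr : (esplit (t0 :: ts)).1.reverse with _ | ⟨b, bs⟩
    · exfalso; rw [hE] at hEr; simp at hEr
    · have hlast : (b :: bs).getLast (by simp) = t0 := by
        have h1 : (b :: bs).getLast? = some t0 := by
          rw [← hEr, List.getLast?_reverse, hE]
          rfl
        rw [List.getLast?_eq_some_getLast (show (b :: bs) ≠ [] by simp)] at h1
        exact Option.some_injective _ h1
      rw [List.append_assoc, List.singleton_append, adjA_append, hlast, ← hEr, adjA_reverse,
        show |t0 - c| = c - t0 by rw [abs_sub_comm]; exact abs_of_nonneg (by omega)]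
      have hsplit : esplit (c :: t0 :: ts) = (c :: (esplit (t0 :: ts)).2, (esplit (t0 :: ts)).1) := by
        simp [esplit]
      have hperm2 : ((adjA (esplit (t0 :: ts)).1).reverse
            ++ (c - t0) :: adjA (c :: (esplit (t0 :: ts)).2)).Perm
          ((c - t0) :: g2 (c :: t0 :: ts)) := by
        refine (List.Perm.append_right _ (List.reverse_perm _)).trans ?_
        refine (List.perm_middle).trans ?_
        refine List.Perm.cons _ ?_
        rw [adjA_eq_g1 hE_pair, adjA_eq_g1 hcO_pair]
        refine List.perm_append_comm.trans ?_
        have := gsplit_perm (c :: t0 :: ts)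
        rw [hsplit] at this
        exact this
      rw [foldl_max_perm hperm2, List.foldl_cons, max_eq_right (by omega : (0 : Int) ≤ c - t0)]
      simp

-- ===== VERDICT (by name: the statement is the Claim_ definition above) =====
theorem solution_spec : Claim_equal_solution := by
  unfold Claim_equal_solution
  intro arr _ hpre
  unfold Spec_solution solution solution_alt
  obtain ⟨hs, hperm⟩ := hfold_spec arr
  rcases hmh : arr.foldl (fun h num => heappush h (-num)) [] with _ | ⟨e0, rest⟩
  · exfalso
    rw [hmh] at hperm
    have := (List.Perm.symm hperm).eq_nil
    exact hpre (by simpa using this)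
  · rw [hmh] at hs hperm
    have hDperm : ((e0 * -1) :: rest.map (· * -1)).Perm arr := by
      have h1 := hperm.map (· * -1)
      have h2 : ((arr.map (fun x => -x)).map (· * -1)) = arr := by
        rw [List.map_map]
        have : ((· * -1) ∘ fun (x : Int) => -x) = id := by funext x; simp
        rw [this, List.map_id]
      rw [h2] at h1
      exact h1
    have hDpair : ((e0 * -1) :: rest.map (· * -1)).Pairwise (· ≥ ·) := by
      have := hs.map (S := (· ≥ ·)) (· * -1)
        (fun a b (hab : a ≤ b) => by dsimp only; linarith)
      simpa using this
    have hd : PySem.List.sorted arr (fun x => x) true = (e0 * -1) :: rest.map (· * -1) :=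
      sorted_eq_desc arr _ hDperm hDpair
    have hpop : popLoop rest 0 [] [] =
        ((esplit (rest.map (· * -1))).1, (esplit (rest.map (· * -1))).2) := by
      have := (popLoop_spec rest 0 [] []).1
      simpa using this
    simp only [hd, hpop]
    rw [loopA_eq, zigzag_eq (e0 * -1) (rest.map (· * -1)) hDpair]
    rcases rest with _ | ⟨r0, rs⟩
    · simp
    · have hlen : ((e0 * -1) :: (r0 :: rs).map (· * -1)).length ≠ 1 := by simp
      rw [if_neg hlen, loopB_eq, if_neg (by simp : ¬ ((r0 :: rs).map (· * -1) = []))]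
      have hget1 : PySem.List.pyGetD ((e0 * -1) :: (r0 :: rs).map (· * -1)) 1 0 = r0 * -1 := by
        rw [show (1 : Int) = ((1 : Nat) : Int) by norm_num, PySem.List.pyGetD_natCast]
        simp
      rw [hget1, PySem.List.pyGetD_zero_cons]
      simp
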